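-- pv_equiv track=rewrite | github.com/wzygxr/shuati | class056_XOR_Operations/Code11_XorExtendedProblems.py | sum_vs_xor
-- ===== SOURCE A (Python) =====
-- def sum_vs_xor(n: int) -> int:
--     """
--     题目4: Sum vs XOR (HackerRank)
--
--     题目来源: HackerRank - Sum vs XOR
--     链接: https://www.hackerrank.com/challenges/sum-vs-xor/problem
--
--     题目描述:
--     给定一个整数n，找出非负整数x的个数，使得x + n == x ^ n。
--
--     解题思路:
--     数学分析：x + n = x ^ n 当且仅当 x & n = 0
--     即x和n在二进制表示中没有重叠的1位。
--     1. 计算n的二进制表示中0的个数count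
--     2. 答案就是2^count
--
--     时间复杂度: O(log n)
--     空间复杂度: O(1)
--
--     工程化考量:
--     - 处理n=0的特殊情况
--     - 使用Python的int类型处理大数
--     - 位运算优化
--
--     Args:
--         n: 输入整数
--
--     Returns:
--         满足条件的x的个数
--     """
--     if n == 0:
--         return 1  # 任何x都满足
--
--     # 计算n的二进制表示中0的个数
--     count_zeros = 0
--     temp = n
--     while temp > 0:
--         if (temp & 1) == 0:
--             count_zeros += 1
--         temp >>= 1
--
--     return 1 << count_zeros
-- ===== SOURCE B (Python) =====
-- def sum_vs_xor(n: int) -> int: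
--     # Closed form: number of zero bits of n = bit_length - popcount; answer is 2^that.
--     if n <= 0:
--         return 1
--     return 1 << (n.bit_length() - n.bit_count())
-- ===== Notes on version B (the rewrite author's own statement) =====
-- stated objective: simpler
-- what changed: Replaces the explicit bit-scanning while-loop tallying zero bits with the closed form 1 << (bit_length - popcount) using two library primitives and no loop.
import Mathlib
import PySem

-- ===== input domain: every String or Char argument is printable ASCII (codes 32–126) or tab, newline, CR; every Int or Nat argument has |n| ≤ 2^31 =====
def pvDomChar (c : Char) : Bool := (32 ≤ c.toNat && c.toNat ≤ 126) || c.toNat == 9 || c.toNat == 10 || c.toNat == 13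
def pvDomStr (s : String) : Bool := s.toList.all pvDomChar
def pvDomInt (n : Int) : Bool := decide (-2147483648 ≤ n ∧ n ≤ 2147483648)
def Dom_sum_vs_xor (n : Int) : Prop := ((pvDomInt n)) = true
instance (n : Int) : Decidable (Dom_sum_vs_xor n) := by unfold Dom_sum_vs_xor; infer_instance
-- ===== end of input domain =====

-- B replaces A's bit-scanning loop with the closed form 1 << (bit_length - popcount); same values, simpler.


-- ===== PORT A =====
-- the 'while temp > 0' loop accumulating count_zeros
def pvLoopA (temp : Int) (countZeros : Nat) : Nat :=
  if h : temp > 0 then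
    pvLoopA (temp >>> (1:Nat)) (if PySem.Int.band temp 1 == 0 then countZeros + 1 else countZeros)
  else countZeros
termination_by temp.toNat
decreasing_by
  have h1 : temp >>> (1:Nat) = temp / 2 := by simp [Int.shiftRight_eq_div_pow]
  omega

def sum_vs_xor (n : Int) : Int :=
  if n == 0 then 1
  else (1 : Int) <<< pvLoopA n 0

-- ===== PORT B =====
def sum_vs_xor_alt (n : Int) : Int :=
  if n ≤ 0 then 1
  else (1 : Int) <<< (PySem.Int.bitLength n - PySem.Int.bitCount n)

-- ===== PRECONDITION & SPEC =====
def Spec_sum_vs_xor (n : Int) (out : Int) : Prop := out = sum_vs_xor_alt n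
instance (n : Int) (out : Int) : Decidable (Spec_sum_vs_xor n out) := by unfold Spec_sum_vs_xor; infer_instance

-- ===== CLAIM (what is proved, stated in full; the proofs are below) =====
def Claim_equal_sum_vs_xor : Prop := ∀ (n : Int), Dom_sum_vs_xor n → Spec_sum_vs_xor n (sum_vs_xor n)

-- ===== LEMMAS AND PROOFS =====

-- loop invariant: the zero-bit tally plus the popcount is the accumulator plus the bit length
theorem pvLoopA_nat (m : Nat) (acc : Nat) :
    pvLoopA (m : Int) acc + PySem.Int.bitCount (m : Int) = acc + PySem.Int.bitLength (m : Int) := by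
  induction m using Nat.strong_induction_on generalizing acc with
  | _ m ih =>
    by_cases hm : 0 < m
    · rw [pvLoopA]
      have hpos : (m : Int) > 0 := by exact_mod_cast hm
      rw [dif_pos hpos]
      have hshift : (m : Int) >>> (1:Nat) = ((m / 2 : Nat) : Int) := by
        have : (m : Int) >>> (1:Nat) = (m : Int) / 2 := by simp [Int.shiftRight_eq_div_pow]
        rw [this]; omega
      have hband : PySem.Int.band (m : Int) 1 = ((m % 2 : Nat) : Int) := by
        have := PySem.Int.band_natCast m 1
        simpa [Nat.and_one_is_mod] using this
      have hIH := ih (m / 2) (by omega)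
      rw [hshift, hband,
        PySem.Int.bitCount_natCast hm, PySem.Int.bitLength_natCast hm]
      by_cases he : m % 2 = 0
      · have h2 := hIH (acc + 1)
        simp only [he, Nat.cast_zero]
        simp only [show ((0 : Int) == 0) = true from rfl, if_pos]
        omega
      · have h1 : m % 2 = 1 := by omega
        have h2 := hIH acc
        simp only [h1, Nat.cast_one]
        simp only [show ((1 : Int) == 0) = false from rfl]
        simp only [Bool.false_eq_true, if_false]
        omega
    · have hm0 : m = 0 := by omega
      subst hm0
      rw [pvLoopA]
      simp [PySem.Int.bitCount_zero, PySem.Int.bitLength_zero]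

theorem pvLoopA_nonpos (t : Int) (acc : Nat) (h : ¬ t > 0) : pvLoopA t acc = acc := by
  rw [pvLoopA, dif_neg h]

-- ===== VERDICT (by name: the statement is the Claim_ definition above) =====
theorem sum_vs_xor_spec : Claim_equal_sum_vs_xor := by
  intro n _
  unfold Spec_sum_vs_xor sum_vs_xor sum_vs_xor_alt
  by_cases hpos : 0 < n
  · have hne : (n == 0) = false := by simp; omega
    have hle : ¬ n ≤ 0 := by omega
    rw [hne, if_neg hle]
    simp only [Bool.false_eq_true, if_false]
    have h := pvLoopA_nat n.toNat 0
    rw [Int.toNat_of_nonneg (by omega)] at h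
    congr 1
    omega
  · by_cases h0 : n = 0
    · subst h0; simp
    · have hne : (n == 0) = false := by simp [h0]
      rw [hne]
      simp only [Bool.false_eq_true, if_false, if_pos (by omega : n ≤ 0)]
      rw [pvLoopA_nonpos n 0 hpos]
      rfl
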